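-- pv_equiv track=rewrite | github.com/ClickHouse/clickhouse-connect | clickhouse_connect/cc_sqlalchemy/ddl/tableengine.py | _find_clause_markers
-- ===== SOURCE A (Python) =====
-- ENGINE_CLAUSES = ("ORDER BY", "PARTITION BY", "PRIMARY KEY", "SAMPLE BY", "TTL", "SETTINGS")
--
-- def _walk_sql(sql: str, start: int = 0):
--     """Yield unquoted characters while tracking nested parenthesis depth."""
--     depth = 0
--     quote_char = None
--     escape = False
--     for i in range(start, len(sql)):
--         char = sql[i]
--         if escape:
--             escape = False
--             continue
--         if quote_char:
--             if char == "\\" and quote_char == "'":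
--                 escape = True
--             elif char == quote_char:
--                 quote_char = None
--             continue
--         if char in {"'", "\"", "`"}:
--             quote_char = char
--             continue
--         if char == "(":
--             depth += 1
--         elif char == ")":
--             depth -= 1
--         yield i, char, depth
--
-- def _find_clause_markers(sql: str) -> list[tuple[int, str]]:
--     markers = []
--     upper_sql = sql.upper()
--     for i, _char, depth in _walk_sql(sql):
--         if depth != 0 or (i > 0 and not sql[i - 1].isspace()):
--             continue
--         for clause in ENGINE_CLAUSES:
--             if upper_sql.startswith(clause, i):
--                 markers.append((i, clause))
--                 break
--     return markers
-- ===== SOURCE B (Python) =====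
-- ENGINE_CLAUSES = ("ORDER BY", "PARTITION BY", "PRIMARY KEY", "SAMPLE BY", "TTL", "SETTINGS")
--
--
-- def _skip_quoted(sql, i, quote_char):
--     """Return the index just past the closing quote (>= len(sql) if unterminated)."""
--     n = len(sql)
--     while i < n:
--         c = sql[i]
--         if c == "\\" and quote_char == "'":
--             i += 2
--         elif c == quote_char:
--             return i + 1
--         else:
--             i += 1
--     return i
--
--
-- def _find_clause_markers(sql):
--     upper_sql = sql.upper()
--     n = len(sql)
--     markers = []
--     i = 0
--     depth = 0
--     while i < n:
--         c = sql[i]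
--         if c in ("'", '"', '`'):
--             i = _skip_quoted(sql, i + 1, c)
--             continue
--         if c == '(':
--             depth += 1
--         elif c == ')':
--             depth -= 1
--         if depth == 0 and (i == 0 or sql[i - 1].isspace()):
--             for clause in ENGINE_CLAUSES:
--                 if upper_sql.startswith(clause, i):
--                     markers.append((i, clause))
--                     break
--         i += 1
--     return markers
-- ===== Notes on version B (the rewrite author's own statement) =====
-- stated objective: alternative
-- what changed: Replaces the _walk_sql generator with its escape/quote_char flag state machine by a direct index while-loop that keeps only the paren depth and consumes quoted spans wholesale via a _skip_quoted helper, checking clause markers inline.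
import Mathlib
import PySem

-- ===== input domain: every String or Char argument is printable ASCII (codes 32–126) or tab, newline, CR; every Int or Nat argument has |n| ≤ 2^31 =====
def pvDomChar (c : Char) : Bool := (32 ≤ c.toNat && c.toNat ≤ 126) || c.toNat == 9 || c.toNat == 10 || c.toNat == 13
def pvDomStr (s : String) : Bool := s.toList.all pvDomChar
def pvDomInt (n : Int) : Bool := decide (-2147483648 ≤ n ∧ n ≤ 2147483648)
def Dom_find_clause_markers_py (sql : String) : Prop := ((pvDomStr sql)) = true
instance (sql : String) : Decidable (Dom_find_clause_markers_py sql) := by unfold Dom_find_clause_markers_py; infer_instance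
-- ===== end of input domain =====

-- B replaces the generator + escape/quote-flag state machine with a direct index loop
-- that consumes quoted spans wholesale via a _skip_quoted helper (objective: alternative decomposition).

-- ENGINE_CLAUSES (shared module constant)
def pvClauses : List String := ["ORDER BY", "PARTITION BY", "PRIMARY KEY", "SAMPLE BY", "TTL", "SETTINGS"]

-- `for clause in ENGINE_CLAUSES: if upper.startswith(clause, i): …; break` — the first
-- matching clause against the tail `us[i:]` (this inner loop is textually shared by A and B).
def pvFirstClause (tail : List Char) : List String → Option String
  | [] => none
  | c :: rest =>
      if PySem.Chars.startswith tail c.toList then some c else pvFirstClause tail rest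

-- ===== PORT A =====
-- state of _walk_sql fused with its only consumer: (depth, quote_char, escape, markers)
def pvAState := Int × Option Char × Bool × List (Int × String)

def pvAStep (cs us : List Char) (st : pvAState) (p : Int × Char) : pvAState :=
  let (depth, quote, escape, markers) := st
  let (i, char) := p
  if escape then (depth, quote, false, markers)
  else
    match quote with
    | some q =>
        if char = '\\' ∧ q = '\'' then (depth, some q, true, markers)
        else if char = q then (depth, none, false, markers)
        else (depth, some q, false, markers)
    | none =>
        if char = '\'' ∨ char = '"' ∨ char = '`' then (depth, some char, false, markers)
        else
          let depth' := if char = '(' then depth + 1 else if char = ')' then depth - 1 else depth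
          -- the yielded (i, char, depth'): consumer body of _find_clause_markers
          if depth' ≠ 0 ∨ (i > 0 ∧ ¬ ((PySem.List.pyGet? cs (i - 1)).elim false PySem.Chars.isspace)) then
            (depth', none, false, markers)
          else
            match pvFirstClause (PySem.List.slice us (some i) none) pvClauses with
            | some c => (depth', none, false, markers ++ [(i, c)])
            | none => (depth', none, false, markers)

def find_clause_markers_py (sql : String) : List (Int × String) :=
  let cs := sql.toList
  let us := PySem.Chars.upper cs
  ((PySem.List.enumerate cs 0).foldl (pvAStep cs us) (0, none, false, [])).2.2.2

-- ===== PORT B =====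
-- the two while-loops of Source B, made total with a structural fuel argument
-- (fuel only bounds the iteration count; it never changes the computed value,
-- since the index grows by at least 1 per step and the loops stop at cs.length)
def pvSkipQuoted (cs : List Char) : Nat → Nat → Char → Nat
  | 0, i, _ => i
  | fuel + 1, i, q =>
    if h : i < cs.length then
      let c := cs[i]
      if c = '\\' ∧ q = '\'' then pvSkipQuoted cs fuel (i + 2) q
      else if c = q then i + 1
      else pvSkipQuoted cs fuel (i + 1) q
    else i

def pvBLoop (cs us : List Char) : Nat → Nat → Int → List (Int × String) → List (Int × String)
  | 0, _, _, markers => markers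
  | fuel + 1, i, depth, markers =>
    if h : i < cs.length then
      let c := cs[i]
      if c = '\'' ∨ c = '"' ∨ c = '`' then
        pvBLoop cs us fuel (pvSkipQuoted cs cs.length (i + 1) c) depth markers
      else
        let depth' := if c = '(' then depth + 1 else if c = ')' then depth - 1 else depth
        let markers' :=
          if depth' = 0 ∧ (i = 0 ∨ PySem.Chars.isspace cs[i - 1]!) then
            match pvFirstClause (us.drop i) pvClauses with
            | some cl => markers ++ [((i : Int), cl)]
            | none => markers
          else markers
        pvBLoop cs us fuel (i + 1) depth' markers'
    else markers

def find_clause_markers_py_alt (sql : String) : List (Int × String) :=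
  let cs := sql.toList
  let us := PySem.Chars.upper cs
  pvBLoop cs us cs.length 0 0 []

-- ===== PRECONDITION & SPEC =====
def Spec_find_clause_markers_py (sql : String) (out : List (Int × String)) : Prop := out = find_clause_markers_py_alt sql
instance (sql : String) (out : List (Int × String)) : Decidable (Spec_find_clause_markers_py sql out) := by unfold Spec_find_clause_markers_py; infer_instance

-- ===== CLAIM (what is proved, stated in full; the proofs are below) =====
def Claim_equal_find_clause_markers_py : Prop := ∀ (sql : String), Dom_find_clause_markers_py sql → Spec_find_clause_markers_py sql (find_clause_markers_py sql)

-- ===== LEMMAS AND PROOFS =====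

theorem pvSkipQuoted_ge (cs : List Char) (fuel : Nat) : ∀ (i : Nat) (q : Char),
    i ≤ pvSkipQuoted cs fuel i q := by
  induction fuel with
  | zero => intro i q; simp [pvSkipQuoted]
  | succ fuel ih =>
    intro i q
    rw [pvSkipQuoted]
    by_cases h : i < cs.length
    · simp only [h, dif_pos]
      by_cases h1 : cs[i] = '\\' ∧ q = '\''
      · simp only [if_pos h1]
        exact le_trans (by omega) (ih (i + 2) q)
      · simp only [if_neg h1]
        by_cases h2 : cs[i] = q
        · simp only [if_pos h2]; omega
        · simp only [if_neg h2]
          exact le_trans (by omega) (ih (i + 1) q)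
    · simp only [h, dif_neg, not_false_iff]
      omega

-- A's fold started in quote state (q, escape off) leaves markers as a fold started in
-- normal state at the index pvSkipQuoted delivers (fuel large enough to finish the scan).
theorem pvQuoteLemma (cs us : List Char) (fuel : Nat) : ∀ (i : Nat) (q : Char) (depth : Int)
    (markers : List (Int × String)), cs.length ≤ fuel + i →
    ((PySem.List.enumerate (cs.drop i) i).foldl (pvAStep cs us) (depth, some q, false, markers)).2.2.2
      = ((PySem.List.enumerate (cs.drop (pvSkipQuoted cs fuel i q)) (pvSkipQuoted cs fuel i q)).foldl
          (pvAStep cs us) (depth, none, false, markers)).2.2.2 := by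
  induction fuel with
  | zero =>
    intro i q depth markers hf
    have hnil : cs.drop i = [] := List.drop_eq_nil_of_le (by omega)
    simp [pvSkipQuoted, hnil]
  | succ fuel ih =>
    intro i q depth markers hf
    rw [pvSkipQuoted]
    by_cases h : i < cs.length
    · simp only [h, dif_pos]
      rw [List.drop_eq_getElem_cons h, PySem.List.enumerate_cons, List.foldl_cons]
      by_cases h1 : cs[i] = '\\' ∧ q = '\''
      · simp only [if_pos h1]
        have step1 : pvAStep cs us (depth, some q, false, markers) (↑i, cs[i])
            = (depth, some q, true, markers) := by
          simp [pvAStep, h1]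
        rw [step1]
        by_cases h2 : i + 1 < cs.length
        · rw [List.drop_eq_getElem_cons h2, PySem.List.enumerate_cons, List.foldl_cons]
          have step2 : pvAStep cs us (depth, some q, true, markers) (↑i + 1, cs[i + 1])
              = (depth, some q, false, markers) := by
            simp [pvAStep]
          rw [step2]
          have hcast : ((i : Int) + 1 + 1) = ((i + 2 : Nat) : Int) := by push_cast; ring
          rw [hcast]
          exact ih (i + 2) q depth markers (by omega)
        · have hnil : cs.drop (i + 1) = [] := List.drop_eq_nil_of_le (by omega)
          have hge := pvSkipQuoted_ge cs fuel (i + 2) q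
          have hnil2 : cs.drop (pvSkipQuoted cs fuel (i + 2) q) = [] :=
            List.drop_eq_nil_of_le (by omega)
          rw [hnil, hnil2]
          simp [PySem.List.enumerate]
      · simp only [if_neg h1]
        by_cases h2 : cs[i] = q
        · simp only [if_pos h2]
          have step1 : pvAStep cs us (depth, some q, false, markers) (↑i, cs[i])
              = (depth, none, false, markers) := by
            simp [pvAStep, h2]
            intro ha hb
            exact absurd ⟨h2.trans ha, hb⟩ h1
          rw [step1]
          have hcast : ((i : Int) + 1) = ((i + 1 : Nat) : Int) := by push_cast; ring
          rw [hcast]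
        · simp only [if_neg h2]
          have step1 : pvAStep cs us (depth, some q, false, markers) (↑i, cs[i])
              = (depth, some q, false, markers) := by
            simp [pvAStep, h1, h2]
          rw [step1]
          have hcast : ((i : Int) + 1) = ((i + 1 : Nat) : Int) := by push_cast; ring
          rw [hcast]
          exact ih (i + 1) q depth markers (by omega)
    · simp only [h, dif_neg, not_false_iff]
      have hnil : cs.drop i = [] := List.drop_eq_nil_of_le (by omega)
      rw [hnil]
      simp [PySem.List.enumerate]

-- main simulation: A's fold from index i in normal mode computes pvBLoop.
theorem pvMainLemma (cs us : List Char) (fuel : Nat) : ∀ (i : Nat) (depth : Int)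
    (markers : List (Int × String)), cs.length ≤ fuel + i →
    ((PySem.List.enumerate (cs.drop i) i).foldl (pvAStep cs us) (depth, none, false, markers)).2.2.2
      = pvBLoop cs us fuel i depth markers := by
  induction fuel with
  | zero =>
    intro i depth markers hf
    have hnil : cs.drop i = [] := List.drop_eq_nil_of_le (by omega)
    simp [pvBLoop, hnil]
  | succ fuel ih =>
    intro i depth markers hf
    rw [pvBLoop]
    by_cases h : i < cs.length
    · simp only [h, dif_pos]
      rw [List.drop_eq_getElem_cons h, PySem.List.enumerate_cons, List.foldl_cons]
      by_cases hq : cs[i] = '\'' ∨ cs[i] = '"' ∨ cs[i] = '`'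
      · simp only [if_pos hq]
        have step1 : pvAStep cs us (depth, none, false, markers) (↑i, cs[i])
            = (depth, some cs[i], false, markers) := by
          simp [pvAStep, hq]
        rw [step1]
        have hcast : ((i : Int) + 1) = ((i + 1 : Nat) : Int) := by push_cast; ring
        rw [hcast, pvQuoteLemma cs us cs.length (i + 1) cs[i] depth markers (by omega)]
        have hge := pvSkipQuoted_ge cs cs.length (i + 1) cs[i]
        exact ih (pvSkipQuoted cs cs.length (i + 1) cs[i]) depth markers (by omega)
      · simp only [if_neg hq]
        have hprev : i ≠ 0 →
            ((PySem.List.pyGet? cs ((i : Int) - 1)).elim false PySem.Chars.isspace)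
              = PySem.Chars.isspace cs[i - 1]! := by
          intro hi
          have hc : ((i : Int) - 1) = ((i - 1 : Nat) : Int) := by omega
          have hlt : i - 1 < cs.length := by omega
          rw [hc, PySem.List.pyGet?_natCast, List.getElem?_eq_getElem hlt,
            getElem!_pos cs (i - 1) hlt]
          rfl
        have hslice : PySem.List.slice us (some (i : Int)) none = us.drop i :=
          PySem.List.slice_from_natCast us i
        have step1 : pvAStep cs us (depth, none, false, markers) (↑i, cs[i])
            = ((if cs[i] = '(' then depth + 1 else if cs[i] = ')' then depth - 1 else depth),
               none, false,
               (if (if cs[i] = '(' then depth + 1 else if cs[i] = ')' then depth - 1 else depth) = 0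
                    ∧ (i = 0 ∨ PySem.Chars.isspace cs[i - 1]!) then
                  match pvFirstClause (us.drop i) pvClauses with
                  | some cl => markers ++ [((i : Int), cl)]
                  | none => markers
                else markers)) := by
          simp only [pvAStep, if_neg hq, Bool.false_eq_true, if_false, hslice]
          set d' := (if cs[i] = '(' then depth + 1 else if cs[i] = ')' then depth - 1 else depth) with hd'
          by_cases hc : d' = 0 ∧ (i = 0 ∨ PySem.Chars.isspace cs[i - 1]!)
          · have hguard : ¬ (d' ≠ 0 ∨ ((i : Int) > 0
                ∧ ¬ ((PySem.List.pyGet? cs ((i : Int) - 1)).elim false PySem.Chars.isspace))) := by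
              push Not
              refine ⟨hc.1, fun hpos => ?_⟩
              have hi : i ≠ 0 := by omega
              rw [hprev hi]
              rcases hc.2 with h0 | hs
              · omega
              · simpa using hs
            rw [if_neg hguard, if_pos hc]
            cases pvFirstClause (List.drop i us) pvClauses <;> rfl
          · have hguard : d' ≠ 0 ∨ ((i : Int) > 0
                ∧ ¬ ((PySem.List.pyGet? cs ((i : Int) - 1)).elim false PySem.Chars.isspace)) := by
              by_cases hd0 : d' = 0
              · right
                have hi : i ≠ 0 := by
                  intro h0
                  exact hc ⟨hd0, Or.inl h0⟩
                refine ⟨by omega, ?_⟩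
                rw [hprev hi]
                intro hs
                exact hc ⟨hd0, Or.inr (by simpa using hs)⟩
              · exact Or.inl hd0
            rw [if_pos hguard, if_neg hc]
        rw [step1]
        have hcast : ((i : Int) + 1) = ((i + 1 : Nat) : Int) := by push_cast; ring
        rw [hcast]
        exact ih (i + 1) _ _ (by omega)
    · simp only [h, dif_neg, not_false_iff]
      have hnil : cs.drop i = [] := List.drop_eq_nil_of_le (by omega)
      rw [hnil]
      simp [PySem.List.enumerate]

-- ===== VERDICT (by name: the statement is the Claim_ definition above) =====
theorem find_clause_markers_py_spec : Claim_equal_find_clause_markers_py := by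
  intro sql _
  unfold Spec_find_clause_markers_py find_clause_markers_py find_clause_markers_py_alt
  simpa using pvMainLemma sql.toList (PySem.Chars.upper sql.toList) sql.toList.length 0 0 [] (by omega)
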